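-- pv_equiv track=rewrite | github.com/monistdavid/human-books | technology and idea/chatbot evolution/chat_aws_3_update.py | get_sentence_list
-- ===== SOURCE A (Python) =====
-- def get_sentence_list(sentence):
--     sentence_list = []
--     for i in sentence.split(","):
--         for il in i.split("!"):
--             for ill in il.split("?"):
--                 for illl in ill.split("."):
--                     sentence_list.append(illl)
--     return sentence_list
-- ===== SOURCE B (Python) =====
-- def get_sentence_list(sentence):
--     result = []
--     buf = ""
--     for ch in sentence:
--         if ch in ",!?.":
--             result.append(buf)
--             buf = ""
--         else:
--             buf += ch
--     result.append(buf)
--     return result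
-- ===== Notes on version B (the rewrite author's own statement) =====
-- stated objective: alternative
-- what changed: Replaced the four nested split passes over intermediate lists with a single left-to-right scan of the characters keeping a current-token buffer.
import Mathlib
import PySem

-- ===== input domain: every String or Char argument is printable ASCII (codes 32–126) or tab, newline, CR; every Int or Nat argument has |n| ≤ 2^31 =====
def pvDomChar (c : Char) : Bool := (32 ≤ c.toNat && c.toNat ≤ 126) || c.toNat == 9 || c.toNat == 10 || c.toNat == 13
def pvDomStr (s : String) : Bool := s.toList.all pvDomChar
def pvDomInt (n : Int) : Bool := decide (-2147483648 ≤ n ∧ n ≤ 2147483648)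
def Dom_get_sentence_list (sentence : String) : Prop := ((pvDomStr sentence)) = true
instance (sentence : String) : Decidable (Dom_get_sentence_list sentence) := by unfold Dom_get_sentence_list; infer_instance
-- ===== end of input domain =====

-- B replaces A's four nested split passes with a single left-to-right scan keeping a token buffer (objective: alternative single-pass formulation; return value proved equal).

-- ===== PORT A =====
def get_sentence_list (sentence : String) : List String :=
  ((PySem.Str.split? sentence ",").getD []).foldl (fun sentence_list i =>
    ((PySem.Str.split? i "!").getD []).foldl (fun sentence_list il =>
      ((PySem.Str.split? il "?").getD []).foldl (fun sentence_list ill =>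
        ((PySem.Str.split? ill ".").getD []).foldl (fun sentence_list illl =>
          sentence_list ++ [illl]) sentence_list) sentence_list) sentence_list) []

-- ===== PORT B =====
def get_sentence_list_alt (sentence : String) : List String :=
  let st := sentence.toList.foldl
    (fun (st : List String × String) ch =>
      if ch = ',' ∨ ch = '!' ∨ ch = '?' ∨ ch = '.' then (st.1 ++ [st.2], "")
      else (st.1, st.2.push ch)) ([], "")
  st.1 ++ [st.2]

-- ===== PRECONDITION & SPEC =====
def Spec_get_sentence_list (sentence : String) (out : List String) : Prop := out = get_sentence_list_alt sentence
instance (sentence : String) (out : List String) : Decidable (Spec_get_sentence_list sentence out) := by unfold Spec_get_sentence_list; infer_instance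

-- ===== CLAIM (what is proved, stated in full; the proofs are below) =====
def Claim_equal_get_sentence_list : Prop := ∀ (sentence : String), Dom_get_sentence_list sentence → Spec_get_sentence_list sentence (get_sentence_list sentence)

-- ===== LEMMAS AND PROOFS =====

-- canonical multi-delimiter split on List Char: the meeting point of both ports
def splitAny (p : Char → Bool) : List Char → List (List Char)
  | [] => [[]]
  | c :: cs => if p c then [] :: splitAny p cs else (splitAny p cs).modifyHead (c :: ·)

theorem splitAny_ne_nil (p : Char → Bool) (cs : List Char) : splitAny p cs ≠ [] := by
  cases cs with
  | nil => simp [splitAny]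
  | cons c cs =>
    simp only [splitAny]
    split
    · simp
    · cases h : splitAny p cs with
      | nil => exact absurd h (splitAny_ne_nil p cs)
      | cons a t => simp [List.modifyHead]

theorem modifyHead_modifyHead' {α : Type} (f g : α → α) (l : List α) (h : l ≠ []) :
    (l.modifyHead g).modifyHead f = l.modifyHead (fun x => f (g x)) := by
  cases l with
  | nil => simp at h
  | cons a t => simp [List.modifyHead]

theorem splitOn_go_single (c : Char) (fuel : Nat) :
    ∀ (l cur : List Char) (accs : List (List Char)), l.length ≤ fuel →
    PySem.Chars.splitOn.go [c] fuel l cur accs =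
      accs.reverse ++ (splitAny (· == c) l).modifyHead (cur.reverse ++ ·) := by
  induction fuel with
  | zero =>
    intro l cur accs h
    have hl : l = [] := List.eq_nil_of_length_eq_zero (Nat.le_zero.mp h)
    subst hl
    rw [PySem.Chars.splitOn.go]
    simp [splitAny, List.modifyHead]
  | succ fuel ih =>
    intro l cur accs h
    cases l with
    | nil =>
      rw [PySem.Chars.splitOn.go]
      simp [splitAny, List.modifyHead]
      omega
    | cons ch rest =>
      rw [PySem.Chars.splitOn.go]
      simp only [List.length_cons] at h
      by_cases hc : ch = c
      · subst hc
        rw [if_pos (by simp [List.isPrefixOf])]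
        rw [ih _ [] _ (by simpa using Nat.le_of_succ_le_succ h)]
        simp only [splitAny, beq_self_eq_true, if_pos, List.modifyHead, List.reverse_cons,
          List.reverse_nil, List.nil_append, List.append_assoc]
        simp only [show ([ch] : List Char).length = 1 from rfl, List.drop_succ_cons, List.drop_zero]
        cases hs : splitAny (· == ch) rest with
        | nil => exact absurd hs (splitAny_ne_nil _ rest)
        | cons a t => simp
      · rw [if_neg (by simp [List.isPrefixOf]; exact fun hh => absurd hh.symm hc)]
        rw [ih rest (ch :: cur) accs (by omega)]
        have hne : splitAny (· == c) rest ≠ [] := splitAny_ne_nil _ rest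
        simp only [splitAny, beq_iff_eq, if_neg hc]
        rw [modifyHead_modifyHead' _ _ _ hne]
        congr 1
        congr 1
        funext x
        simp

theorem splitOn_single (c : Char) (cs : List Char) :
    PySem.Chars.splitOn cs [c] = splitAny (· == c) cs := by
  rw [PySem.Chars.splitOn, splitOn_go_single c (cs.length + 1) cs [] [] (by omega)]
  cases h : splitAny (· == c) cs with
  | nil => exact absurd h (splitAny_ne_nil _ cs)
  | cons a t => simp [List.modifyHead]

theorem splitAny_union (c : Char) (p : Char → Bool) (cs : List Char) :
    (splitAny (· == c) cs).flatMap (splitAny p) =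
      splitAny (fun x => x == c || p x) cs := by
  induction cs with
  | nil => simp [splitAny]
  | cons ch rest ih =>
    by_cases hc : ch = c
    · subst hc
      simp only [splitAny, beq_self_eq_true, if_pos, Bool.true_or]
      rw [List.flatMap_cons, ← ih]
      simp [splitAny]
    · by_cases hp : p ch = true
      · simp only [splitAny, beq_iff_eq, if_neg hc, hp, Bool.or_true]
        rw [if_pos (by simp [hp])]
        cases hs : splitAny (· == c) rest with
        | nil => exact absurd hs (splitAny_ne_nil _ rest)
        | cons a t =>
          simp only [List.modifyHead, List.flatMap_cons]
          simp only [splitAny, hp, if_pos, List.cons_append]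
          congr 1
          have h2 := ih
          rw [hs, List.flatMap_cons] at h2
          exact h2
      · simp only [splitAny, beq_iff_eq, if_neg hc, hp, Bool.or_false]
        cases hs : splitAny (· == c) rest with
        | nil => exact absurd hs (splitAny_ne_nil _ rest)
        | cons a t =>
          have h2 := ih
          rw [hs, List.flatMap_cons] at h2
          rw [← h2]
          simp only [List.modifyHead, List.flatMap_cons, splitAny, hp]
          cases ha : splitAny p a with
          | nil => exact absurd ha (splitAny_ne_nil _ a)
          | cons b u => simp [List.modifyHead]

theorem split?_getD (s : String) (c : Char) (sep : String) (hs : sep.toList = [c]) :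
    (PySem.Str.split? s sep).getD [] = (splitAny (· == c) s.toList).map String.ofList := by
  simp [PySem.Str.split?, PySem.Chars.split?, hs, splitOn_single]

theorem foldl_pieces (f : List String → String → List String)
    (g : List Char → List (List Char))
    (hf : ∀ acc x, f acc x = acc ++ (g x.toList).map String.ofList) :
    ∀ (pieces : List (List Char)) (acc : List String),
    (pieces.map String.ofList).foldl f acc = acc ++ (pieces.flatMap g).map String.ofList := by
  intro pieces
  induction pieces with
  | nil => simp
  | cons a t ih =>
    intro acc
    rw [List.map_cons, List.foldl_cons, hf, ih, List.flatMap_cons]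
    simp [String.toList_ofList]

def pDelim (x : Char) : Bool := x == ',' || (x == '!' || (x == '?' || x == '.'))

theorem A_eq_splitAny (s : String) :
    get_sentence_list s = (splitAny pDelim s.toList).map String.ofList := by
  have lvl4 : ∀ (acc : List String) (ill : String),
      ((PySem.Str.split? ill ".").getD []).foldl (fun sl illl => sl ++ [illl]) acc
      = acc ++ (splitAny (· == '.') ill.toList).map String.ofList := by
    intro acc ill
    rw [split?_getD ill '.' "." rfl]
    rw [show (fun (sl : List String) illl => sl ++ [illl]) =
          (fun (sl : List String) illl => sl ++ (fun x => [x]) illl) from rfl,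
        PySem.List.foldl_append_eq_flatMap]
    congr 1
    simp only [List.flatMap]
    induction splitAny (· == '.') ill.toList with
    | nil => rfl
    | cons a t ih => simp_all
  have lvl3 : ∀ (acc : List String) (il : String),
      ((PySem.Str.split? il "?").getD []).foldl (fun sl ill =>
        ((PySem.Str.split? ill ".").getD []).foldl (fun sl illl => sl ++ [illl]) sl) acc
      = acc ++ (splitAny (fun x => x == '?' || x == '.') il.toList).map String.ofList := by
    intro acc il
    rw [split?_getD il '?' "?" rfl,
        foldl_pieces _ (splitAny (· == '.')) (fun a x => lvl4 a x),
        splitAny_union]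
  have lvl2 : ∀ (acc : List String) (i : String),
      ((PySem.Str.split? i "!").getD []).foldl (fun sl il =>
        ((PySem.Str.split? il "?").getD []).foldl (fun sl ill =>
          ((PySem.Str.split? ill ".").getD []).foldl (fun sl illl => sl ++ [illl]) sl) sl) acc
      = acc ++ (splitAny (fun x => x == '!' || (x == '?' || x == '.')) i.toList).map String.ofList := by
    intro acc i
    rw [split?_getD i '!' "!" rfl,
        foldl_pieces _ (splitAny (fun x => x == '?' || x == '.')) (fun a x => lvl3 a x),
        splitAny_union]
  unfold get_sentence_list
  rw [split?_getD s ',' "," rfl,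
      foldl_pieces _ (splitAny (fun x => x == '!' || (x == '?' || x == '.'))) (fun a x => lvl2 a x),
      splitAny_union]
  rfl

theorem B_fold (cs : List Char) : ∀ (acc : List String) (buf : String),
    (let st := cs.foldl
      (fun (st : List String × String) ch =>
        if ch = ',' ∨ ch = '!' ∨ ch = '?' ∨ ch = '.' then (st.1 ++ [st.2], "")
        else (st.1, st.2.push ch)) (acc, buf)
     st.1 ++ [st.2])
    = acc ++ ((splitAny pDelim cs).modifyHead (fun t => buf.toList ++ t)).map String.ofList := by
  induction cs with
  | nil =>
    intro acc buf
    simp [splitAny, List.modifyHead, String.ofList_toList]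
  | cons c rest ih =>
    intro acc buf
    by_cases hd : c = ',' ∨ c = '!' ∨ c = '?' ∨ c = '.'
    · have hp : pDelim c = true := by
        rcases hd with h|h|h|h <;> simp [pDelim, h]
      simp only [List.foldl_cons, if_pos hd]
      rw [ih (acc ++ [buf]) ""]
      simp only [splitAny, hp, if_pos, List.modifyHead]
      cases hs : splitAny pDelim rest with
      | nil => exact absurd hs (splitAny_ne_nil _ rest)
      | cons a t => simp [String.ofList_toList]
    · have hp : pDelim c = false := by
        simp [pDelim]
        push_neg at hd
        exact ⟨hd.1, hd.2.1, hd.2.2.1, hd.2.2.2⟩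
      simp only [List.foldl_cons, if_neg hd]
      rw [ih acc (buf.push c)]
      simp only [splitAny, hp, if_neg (by simp : ¬((false:Bool) = true))]
      have hne := splitAny_ne_nil pDelim rest
      rw [modifyHead_modifyHead' _ _ _ hne]
      have harg : (fun x => (buf.push c).toList ++ x) = (fun x => buf.toList ++ c :: x) := by
        funext x
        simp [String.toList_push]
      rw [harg]

theorem B_eq_splitAny (s : String) :
    get_sentence_list_alt s = (splitAny pDelim s.toList).map String.ofList := by
  unfold get_sentence_list_alt
  rw [B_fold s.toList [] ""]
  cases h : splitAny pDelim s.toList with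
  | nil => exact absurd h (splitAny_ne_nil _ s.toList)
  | cons a t => simp [List.modifyHead]

-- ===== VERDICT (by name: the statement is the Claim_ definition above) =====
theorem get_sentence_list_spec : Claim_equal_get_sentence_list := by
  intro s _
  unfold Spec_get_sentence_list
  rw [A_eq_splitAny, B_eq_splitAny]
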